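-- pv_equiv track=rewrite | github.com/IvanTelminov/school | lesson 2023-09-24/array.py | find_max_multiples_of_three
-- ===== SOURCE A (Python) =====
-- def find_max_multiples_of_three(arr):
--     max1 = -300
--     max2 = -300
--
--     for num in arr:
--         if num % 3 == 0:
--             if num > max1:
--                 max2 = max1
--                 max1 = num
--             elif num > max2:
--                 max2 = num
--
--     return max1, max2
-- ===== SOURCE B (Python) =====
-- def find_max_multiples_of_three(arr):
--     # Filter+sort strategy: two -300 sentinels reproduce the default/threshold behaviour.
--     pool = sorted([n for n in arr if n % 3 == 0] + [-300, -300], reverse=True)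
--     return pool[0], pool[1]
-- ===== Notes on version B (the rewrite author's own statement) =====
-- stated objective: simpler
-- what changed: Replaced the single-pass top-2 tracking loop (max1/max2 with shifting) by filtering the multiples of three, appending two -300 sentinels, sorting descending and taking the first two elements.
import Mathlib
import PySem

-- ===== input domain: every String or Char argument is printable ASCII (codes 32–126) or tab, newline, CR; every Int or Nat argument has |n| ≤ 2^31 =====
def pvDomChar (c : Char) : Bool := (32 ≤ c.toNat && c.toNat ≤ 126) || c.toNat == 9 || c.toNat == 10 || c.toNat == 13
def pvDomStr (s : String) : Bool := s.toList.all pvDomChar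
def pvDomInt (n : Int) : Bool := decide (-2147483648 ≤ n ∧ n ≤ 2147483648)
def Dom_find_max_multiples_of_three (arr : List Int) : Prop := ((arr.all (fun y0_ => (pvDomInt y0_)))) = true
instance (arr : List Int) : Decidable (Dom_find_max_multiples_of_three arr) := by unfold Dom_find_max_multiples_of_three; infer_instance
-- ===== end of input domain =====

-- B replaces A's single-pass top-2 tracking loop by filter + two -300 sentinels + descending sort + take first two (objective: simpler).

-- ===== PORT A =====
-- literal port of A: fold over arr carrying (max1, max2), starting (-300, -300)
def find_max_multiples_of_three (arr : List Int) : Int × Int :=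
  arr.foldl (fun s num =>
    if PySem.Int.mod num 3 == 0 then
      if num > s.1 then (num, s.1)
      else if num > s.2 then (s.1, num)
      else s
    else s) (-300, -300)

-- ===== PORT B =====
-- literal port of Source B: pool = sorted(filter ++ [-300,-300], reverse=True); return (pool[0], pool[1]).
-- pool always has at least two elements, so the catch-all branch is unreachable.
def find_max_multiples_of_three_alt (arr : List Int) : Int × Int :=
  match PySem.List.sorted ((arr.filter (fun n => PySem.Int.mod n 3 == 0)) ++ [-300, -300]) (fun x => x) true with
  | a :: b :: _ => (a, b)
  | _ => (-300, -300)

-- ===== PRECONDITION & SPEC =====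
def Spec_find_max_multiples_of_three (arr : List Int) (out : Int × Int) : Prop := out = find_max_multiples_of_three_alt arr
instance (arr : List Int) (out : Int × Int) : Decidable (Spec_find_max_multiples_of_three arr out) := by unfold Spec_find_max_multiples_of_three; infer_instance

-- ===== CLAIM (what is proved, stated in full; the proofs are below) =====
def Claim_equal_find_max_multiples_of_three : Prop := ∀ (arr : List Int), Dom_find_max_multiples_of_three arr → Spec_find_max_multiples_of_three arr (find_max_multiples_of_three arr)

-- ===== LEMMAS AND PROOFS =====

-- A's loop body once the divisibility test has passed
def pvIns (s : Int × Int) (num : Int) : Int × Int :=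
  if num > s.1 then (num, s.1) else if num > s.2 then (s.1, num) else s

-- descending insertion step (the comparator PySem.List.sorted uses for reverse=True, key=id)
def pvStep (acc : List Int) (x : Int) : List Int :=
  PySem.List.insertBy (fun a b => decide (b < a)) x acc

lemma pvInsertBy_perm (x : Int) (l : List Int) :
    (PySem.List.insertBy (fun a b => decide (b < a)) x l).Perm (x :: l) := by
  induction l with
  | nil => simp [PySem.List.insertBy]
  | cons y ys ih =>
    simp only [PySem.List.insertBy]
    split
    · exact List.Perm.refl _
    · exact (ih.cons y).trans (List.Perm.swap x y ys)

lemma pvInsertBy_pairwise (x : Int) (l : List Int)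
    (h : l.Pairwise (fun a b => b ≤ a)) :
    (PySem.List.insertBy (fun a b => decide (b < a)) x l).Pairwise (fun a b => b ≤ a) := by
  induction l with
  | nil => simp [PySem.List.insertBy]
  | cons y ys ih =>
    rcases List.pairwise_cons.mp h with ⟨hy, hys⟩
    simp only [PySem.List.insertBy]
    split
    · rename_i hlt
      refine List.pairwise_cons.mpr ⟨?_, h⟩
      intro z hz
      rcases List.mem_cons.mp hz with rfl | hz
      · exact le_of_lt (by simpa using hlt)
      · exact le_trans (hy z hz) (le_of_lt (by simpa using hlt))
    · rename_i hnlt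
      refine List.pairwise_cons.mpr ⟨?_, ih hys⟩
      intro z hz
      rcases (PySem.List.mem_insertBy _ x z ys).mp hz with rfl | hz
      · simpa using hnlt
      · exact hy z hz

lemma pvFoldStep_perm (f : List Int) (acc : List Int) :
    (f.foldl pvStep acc).Perm (f ++ acc) := by
  induction f generalizing acc with
  | nil => simp
  | cons x xs ih =>
    simp only [List.foldl_cons]
    refine (ih (pvStep acc x)).trans ?_
    have h1 : (xs ++ pvStep acc x).Perm (xs ++ x :: acc) :=
      List.Perm.append_left xs (pvInsertBy_perm x acc)
    refine h1.trans ?_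
    simp only [List.cons_append] at *
    exact List.perm_middle.symm.symm

lemma pvFoldStep_pairwise (f : List Int) (acc : List Int)
    (h : acc.Pairwise (fun a b => b ≤ a)) :
    (f.foldl pvStep acc).Pairwise (fun a b => b ≤ a) := by
  induction f generalizing acc with
  | nil => simpa
  | cons x xs ih => exact ih _ (pvInsertBy_pairwise x acc h)

-- invariant: inserting the filtered elements into m1::m2::rest tracks A's (max1, max2)
lemma pvInv (f : List Int) :
    ∀ (m1 m2 : Int) (rest : List Int), m2 ≤ m1 → (∀ r ∈ rest, r ≤ m2) →
    ∃ rest', f.foldl pvStep (m1 :: m2 :: rest) =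
        (f.foldl pvIns (m1, m2)).1 :: (f.foldl pvIns (m1, m2)).2 :: rest'
      ∧ (f.foldl pvIns (m1, m2)).2 ≤ (f.foldl pvIns (m1, m2)).1
      ∧ (∀ r ∈ rest', r ≤ (f.foldl pvIns (m1, m2)).2) := by
  induction f with
  | nil =>
    intro m1 m2 rest h12 hrest
    exact ⟨rest, rfl, h12, hrest⟩
  | cons x xs ih =>
    intro m1 m2 rest h12 hrest
    simp only [List.foldl_cons]
    by_cases h1 : m1 < x
    · have hstep : pvStep (m1 :: m2 :: rest) x = x :: m1 :: m2 :: rest := by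
        simp [pvStep, PySem.List.insertBy, h1]
      have hins : pvIns (m1, m2) x = (x, m1) := by
        simp [pvIns, h1]
      rw [hstep, hins]
      exact ih x m1 (m2 :: rest) (le_of_lt h1)
        (by intro r hr; rcases List.mem_cons.mp hr with rfl | hr
            · exact h12
            · exact le_trans (hrest r hr) h12)
    · by_cases h2 : m2 < x
      · have hstep : pvStep (m1 :: m2 :: rest) x = m1 :: x :: m2 :: rest := by
          simp [pvStep, PySem.List.insertBy, h1, h2]
        have hins : pvIns (m1, m2) x = (m1, x) := by
          simp [pvIns, h1, h2]
        rw [hstep, hins]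
        exact ih m1 x (m2 :: rest) (not_lt.mp h1)
          (by intro r hr; rcases List.mem_cons.mp hr with rfl | hr
              · exact le_of_lt h2
              · exact le_trans (hrest r hr) (le_of_lt h2))
      · have hstep : pvStep (m1 :: m2 :: rest) x =
            m1 :: m2 :: PySem.List.insertBy (fun a b => decide (b < a)) x rest := by
          simp [pvStep, PySem.List.insertBy, h1, h2]
        have hins : pvIns (m1, m2) x = (m1, m2) := by
          simp [pvIns, h1, h2]
        rw [hstep, hins]
        exact ih m1 m2 _ h12
          (by intro r hr
              rcases (PySem.List.mem_insertBy _ x r rest).mp hr with rfl | hr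
              · exact not_lt.mp h2
              · exact hrest r hr)

-- folding A's guarded body over arr = folding pvIns over the filtered list
lemma pvFoldFilter (arr : List Int) (init : Int × Int) :
    arr.foldl (fun s num =>
      if PySem.Int.mod num 3 == 0 then
        if num > s.1 then (num, s.1)
        else if num > s.2 then (s.1, num)
        else s
      else s) init
    = (arr.filter (fun n => PySem.Int.mod n 3 == 0)).foldl pvIns init := by
  induction arr generalizing init with
  | nil => rfl
  | cons x xs ih =>
    by_cases hx : PySem.Int.mod x 3 == 0
    · simp only [List.foldl_cons, List.filter_cons, hx, if_pos, ih]
      simp [pvIns]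
    · simp only [List.foldl_cons, List.filter_cons, hx]
      simp only [Bool.false_eq_true, if_false, ih]

lemma pvSorted_eq (f : List Int) :
    PySem.List.sorted (f ++ [-300, -300]) (fun x => x) true = f.foldl pvStep [-300, -300] := by
  have hkey : Function.Injective (fun x : Int => -x) := fun a b h => by simpa using neg_injective h
  apply PySem.List.eq_of_perm_of_pairwise_le_of_injective (fun x : Int => -x) hkey
  · exact (PySem.List.sorted_perm (f ++ [-300, -300]) (fun x : Int => x) true).trans
      (pvFoldStep_perm f [-300, -300]).symm
  · have := PySem.List.sorted_pairwise_rev (f ++ [-300, -300]) (fun x : Int => x)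
    exact this.imp (fun h => by simpa using h)
  · have : (f.foldl pvStep [-300, -300]).Pairwise (fun a b : Int => b ≤ a) :=
      pvFoldStep_pairwise f [-300, -300] (by simp)
    exact this.imp (fun h => by simpa using h)

-- ===== VERDICT (by name: the statement is the Claim_ definition above) =====
theorem find_max_multiples_of_three_spec : Claim_equal_find_max_multiples_of_three := by
  intro arr _
  unfold Spec_find_max_multiples_of_three find_max_multiples_of_three find_max_multiples_of_three_alt
  set f := arr.filter (fun n => PySem.Int.mod n 3 == 0) with hf
  rw [pvFoldFilter, pvSorted_eq]
  obtain ⟨rest', heq, -, -⟩ := pvInv f (-300) (-300) [] le_rfl (by simp)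
  rw [heq]
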